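-- pv_equiv track=rewrite | github.com/k-unker/codewars_katas | where_is_my_parent.py | find_children
-- ===== SOURCE A (Python) =====
-- def find_children(dancing_brigade):
--     myarr = []
--     dancing_brigade = sorted(dancing_brigade)
--     for i in range(len(dancing_brigade)):
--         if dancing_brigade[i].lower() in dancing_brigade or dancing_brigade[i].upper() in dancing_brigade:
--             myarr.append(dancing_brigade[i])
--             mysmall = dancing_brigade[i].lower()
--             mylarge = dancing_brigade[i].upper()
--             mycounter = dancing_brigade.count(mysmall) - dancing_brigade.count(mylarge)
--             a = 0
--             while a <= mycounter:
--                 myarr.append(dancing_brigade[i].lower())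
--                 a += 1
--     return ''.join(myarr)[:len(dancing_brigade)]
-- ===== SOURCE B (Python) =====
-- def find_children(dancing_brigade):
--     counts = {}
--     for s in dancing_brigade:
--         counts[s] = counts.get(s, 0) + 1
--     parts = []
--     for s in sorted(counts):
--         lo = s.lower()
--         up = s.upper()
--         if lo in counts or up in counts:
--             diff = counts.get(lo, 0) - counts.get(up, 0)
--             block = s + lo * (diff + 1 if diff >= 0 else 0)
--             parts.append(block * counts[s])
--     return ''.join(parts)[:len(dancing_brigade)]
-- ===== Notes on version B (the rewrite author's own statement) =====
-- stated objective: faster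
-- what changed: B builds a count dict in one pass and iterates only the sorted distinct elements, emitting each element's block repeated by its multiplicity, instead of A's per-element pass that rescans the whole list with `in` and .count and runs an inner while loop for every occurrence.
import Mathlib
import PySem

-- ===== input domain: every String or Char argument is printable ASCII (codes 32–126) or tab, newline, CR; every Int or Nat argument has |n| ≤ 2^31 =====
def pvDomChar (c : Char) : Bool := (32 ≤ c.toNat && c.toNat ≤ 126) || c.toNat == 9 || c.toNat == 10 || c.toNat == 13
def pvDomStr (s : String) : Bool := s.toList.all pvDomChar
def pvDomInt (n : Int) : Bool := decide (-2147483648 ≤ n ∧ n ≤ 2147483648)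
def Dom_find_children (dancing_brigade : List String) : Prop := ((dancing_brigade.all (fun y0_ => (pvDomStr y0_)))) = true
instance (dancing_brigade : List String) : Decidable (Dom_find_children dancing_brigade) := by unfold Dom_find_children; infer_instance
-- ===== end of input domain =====

-- B replaces A's per-element pass (with its repeated list.count/`in` scans and inner while loop) by one
-- counting dict built once and a single pass over the sorted distinct elements, emitting each element's
-- block repeated by its multiplicity; objective: faster.

-- ===== PORT A =====
-- the 'while a <= mycounter: myarr.append(lower); a += 1' loop of A
def pvWhileA (lo : String) (mycounter : Int) (a : Int) (myarr : List String) : List String :=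
  if a ≤ mycounter then pvWhileA lo mycounter (a + 1) (myarr ++ [lo]) else myarr
termination_by (mycounter + 1 - a).toNat
decreasing_by omega

def find_children (dancing_brigade : List String) : String :=
  let db := PySem.List.sorted dancing_brigade (fun x => x) false
  let myarr := (PySem.List.pyRange 0 (PySem.List.len db)).foldl (fun myarr i =>
    let s := PySem.List.pyGetD db i ""
    if db.contains (PySem.Str.lower s) || db.contains (PySem.Str.upper s) then
      let myarr := myarr ++ [s]
      let mysmall := PySem.Str.lower s
      let mylarge := PySem.Str.upper s
      let mycounter := (PySem.List.count db mysmall : Int) - (PySem.List.count db mylarge : Int)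
      pvWhileA mysmall mycounter 0 myarr
    else myarr) []
  PySem.Str.slice (PySem.Str.join "" myarr) none (some (PySem.List.len db))

-- ===== PORT B =====
-- Python 'block * n' string repetition
def pvStrMul (s : String) (n : Int) : String :=
  PySem.Str.join "" (List.replicate n.toNat s)

def find_children_alt (dancing_brigade : List String) : String :=
  let counts := dancing_brigade.foldl (fun d s => d.insert s (d.getD s 0 + 1)) PySem.Dict.empty
  let ks := PySem.List.sorted counts.keys (fun x => x) false
  let parts := ks.foldl (fun parts s =>
    let lo := PySem.Str.lower s
    let up := PySem.Str.upper s
    if counts.contains lo || counts.contains up then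
      let diff := counts.getD lo 0 - counts.getD up 0
      let block := s ++ pvStrMul lo (if 0 ≤ diff then diff + 1 else 0)
      parts ++ [pvStrMul block (counts.getD s 0)]
    else parts) []
  PySem.Str.slice (PySem.Str.join "" parts) none (some (PySem.List.len dancing_brigade))

-- ===== PRECONDITION & SPEC =====
def Spec_find_children (dancing_brigade : List String) (out : String) : Prop := out = find_children_alt dancing_brigade
instance (dancing_brigade : List String) (out : String) : Decidable (Spec_find_children dancing_brigade out) := by unfold Spec_find_children; infer_instance

-- ===== CLAIM (what is proved, stated in full; the proofs are below) =====
def Claim_equal_find_children : Prop := ∀ (dancing_brigade : List String), Dom_find_children dancing_brigade → Spec_find_children dancing_brigade (find_children dancing_brigade)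

-- ===== LEMMAS AND PROOFS =====

-- the membership test and count difference both programs consult, stated on the original list
def pvCond (db : List String) (s : String) : Bool :=
  db.contains (PySem.Str.lower s) || db.contains (PySem.Str.upper s)

def pvDiff (db : List String) (s : String) : Int :=
  (PySem.List.count db (PySem.Str.lower s) : Int) - (PySem.List.count db (PySem.Str.upper s) : Int)

-- what one occurrence of s contributes, as a list of strings (A) and as characters
def pvABlk (db : List String) (s : String) : List String :=
  if pvCond db s then s :: List.replicate (pvDiff db s + 1).toNat (PySem.Str.lower s) else []

def pvCharBlk (db : List String) (s : String) : List Char :=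
  if pvCond db s then
    s.toList ++ (List.replicate (pvDiff db s + 1).toNat (PySem.Chars.lower s.toList)).flatten
  else []

theorem pvWhileA_eq (lo : String) (mycounter a : Int) (myarr : List String) :
    pvWhileA lo mycounter a myarr = myarr ++ List.replicate (mycounter + 1 - a).toNat lo := by
  fun_induction pvWhileA with
  | case1 a myarr h ih =>
      rw [ih]
      have : (mycounter + 1 - a).toNat = (mycounter + 1 - (a + 1)).toNat + 1 := by omega
      rw [this, List.replicate_succ]
      simp
  | case2 a myarr h =>
      have : (mycounter + 1 - a).toNat = 0 := by omega
      simp [this]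

theorem pvJoinNilFlatten (l : List (List Char)) : PySem.Chars.join [] l = l.flatten := by
  match l with
  | [] => simp [PySem.Chars.join_nil]
  | [p] => simp [PySem.Chars.join_singleton]
  | p :: q :: rest =>
      rw [PySem.Chars.join_cons_cons, pvJoinNilFlatten (q :: rest)]
      simp

theorem pvFlattenMapFlatMap {α : Type} (l : List α) (f : α → List String) :
    ((l.flatMap f).map String.toList).flatten = l.flatMap (fun x => ((f x).map String.toList).flatten) := by
  induction l with
  | nil => simp
  | cons a t ih => simp [List.flatMap_cons, ih]

theorem pvCountFlatMapReplicate (ks : List String) (c : String → Nat) (h : ks.Nodup) (v : String) :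
    (ks.flatMap fun s => List.replicate (c s) s).count v = if v ∈ ks then c v else 0 := by
  induction ks with
  | nil => simp
  | cons a t ih =>
      simp only [List.flatMap_cons, List.count_append, List.nodup_cons] at *
      rw [ih h.2, List.count_replicate]
      by_cases hv : v = a
      · subst hv; simp [h.1]
      · simp [hv, Ne.symm hv, beq_iff_eq]

theorem pvPairwiseLeFlatMapReplicate (ks : List String) (c : String → Nat)
    (h : ks.Pairwise (· < ·)) :
    (ks.flatMap fun s => List.replicate (c s) s).Pairwise (· ≤ ·) := by
  induction ks with
  | nil => simp
  | cons a t ih =>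
      rw [List.pairwise_cons] at h
      simp only [List.flatMap_cons]
      rw [List.pairwise_append]
      refine ⟨?_, ih h.2, ?_⟩
      · rw [List.pairwise_replicate]; right; exact le_refl a
      · intro x hx y hy
        obtain rfl := List.eq_of_mem_replicate hx
        obtain ⟨s, hs, hy'⟩ := List.mem_flatMap.mp hy
        obtain rfl := List.eq_of_mem_replicate hy'
        exact le_of_lt (h.1 _ hs)

-- sorted(db) is the sorted distinct elements, each repeated by its multiplicity
theorem pvGrouping (db : List String) :
    PySem.List.sorted db (fun x => x) false =
      (PySem.List.sorted (PySem.Set.ofList db) (fun x => x) false).flatMap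
        (fun s => List.replicate (db.count s) s) := by
  have hpl : (PySem.List.sorted (PySem.Set.ofList db) (fun x => x) false).Pairwise (· < ·) :=
    PySem.List.sorted_ofList_pairwise_lt db
  have hnd : (PySem.List.sorted (PySem.Set.ofList db) (fun x => x) false).Nodup :=
    hpl.imp (fun h => ne_of_lt h)
  have hmem : ∀ v : String, v ∈ PySem.List.sorted (PySem.Set.ofList db) (fun x => x) false ↔ v ∈ db := by
    intro v
    rw [PySem.List.mem_sorted]
    exact PySem.Set.mem_ofList db v
  apply PySem.List.sorted_id_eq_of_perm_of_pairwise
  · rw [List.perm_iff_count]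
    intro v
    rw [pvCountFlatMapReplicate _ _ hnd v]
    by_cases hv : v ∈ db
    · simp [(hmem v).mpr hv]
    · have hv' : v ∉ PySem.List.sorted (PySem.Set.ofList db) (fun x => x) false :=
        fun h => hv ((hmem v).mp h)
      simp [hv', List.count_eq_zero.mpr hv]
  · exact pvPairwiseLeFlatMapReplicate _ _ hpl

theorem pvFlatMapFilter {α : Type} (l : List α) (p : α → Bool) (f : α → List Char)
    (h : ∀ s ∈ l, p s = false → f s = []) :
    l.flatMap f = (l.filter p).flatMap f := by
  induction l with
  | nil => simp
  | cons a t ih =>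
      rw [List.flatMap_cons, List.filter_cons]
      by_cases hp : p a = true
      · simp [hp, ih (fun s hs => h s (List.mem_cons_of_mem _ hs))]
      · rw [h a (List.mem_cons_self) (by simpa using hp)]
        simp [hp, ih (fun s hs => h s (List.mem_cons_of_mem _ hs))]

theorem pvStrMul_toList (s : String) (n : Int) :
    (pvStrMul s n).toList = (List.replicate n.toNat s.toList).flatten := by
  simp [pvStrMul, PySem.Str.toList_join, pvJoinNilFlatten, List.map_replicate]

-- A's loop over the sorted input is the per-occurrence blocks, concatenated
theorem pvAfold (db : List String) :
    List.foldl
      (fun (myarr : List String) (s : String) =>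
        if ((PySem.List.sorted db fun x => x).contains (PySem.Str.lower s) ||
            (PySem.List.sorted db fun x => x).contains (PySem.Str.upper s)) = true then
          pvWhileA (PySem.Str.lower s)
            ((PySem.List.count (PySem.List.sorted db fun x => x) (PySem.Str.lower s) : Int) -
             (PySem.List.count (PySem.List.sorted db fun x => x) (PySem.Str.upper s) : Int)) 0
            (myarr ++ [s])
        else myarr) [] (PySem.List.sorted db fun x => x) =
    (PySem.List.sorted db fun x => x).flatMap (pvABlk db) := by
  have hcont : ∀ y : String, (PySem.List.sorted db fun x => x).contains y = db.contains y := by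
    intro y
    rw [Bool.eq_iff_iff]
    simp only [List.contains_iff_mem, PySem.List.mem_sorted]
  have hcount : ∀ y : String,
      PySem.List.count (PySem.List.sorted db fun x => x) y = PySem.List.count db y := by
    intro y
    simp only [PySem.List.count_eq]
    exact (PySem.List.sorted_perm db (fun x => x) false).count_eq y
  rw [PySem.List.foldl_congr_mem _ _ (fun acc x => acc ++ pvABlk db x) []
      (by
        intro acc x hx
        rw [hcont, hcont, hcount, hcount, pvWhileA_eq]
        unfold pvABlk pvCond pvDiff
        split_ifs with h
        · simp at h ⊢; tauto
        · simp at h ⊢; tauto),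
    PySem.List.foldl_append_eq_flatMap]
  simp

theorem pvABlkToList (db : List String) (s : String) :
    ((pvABlk db s).map String.toList).flatten = pvCharBlk db s := by
  by_cases h : pvCond db s
  · simp [pvABlk, pvCharBlk, h, List.map_replicate, PySem.Str.toList_lower]
  · simp [pvABlk, pvCharBlk, h]

theorem pvFlatMapCongr {α : Type} (l : List α) (f g : α → List Char)
    (h : ∀ s ∈ l, f s = g s) : l.flatMap f = l.flatMap g := by
  induction l with
  | nil => simp
  | cons a t ih =>
      rw [List.flatMap_cons, List.flatMap_cons, h a List.mem_cons_self,
        ih (fun s hs => h s (List.mem_cons_of_mem _ hs))]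

theorem pvBstrToList (db : List String) (s : String) (h : pvCond db s = true) :
    (pvStrMul
      (s ++ pvStrMul (PySem.Str.lower s)
        (if 0 ≤ ((List.count (PySem.Str.lower s) db : Int) - (List.count (PySem.Str.upper s) db : Int))
         then ((List.count (PySem.Str.lower s) db : Int) - (List.count (PySem.Str.upper s) db : Int)) + 1
         else 0))
      ((List.count s db : Int))).toList =
    (List.replicate (db.count s) (pvCharBlk db s)).flatten := by
  have hd : ((List.count (PySem.Str.lower s) db : Int) - (List.count (PySem.Str.upper s) db : Int)) =
      pvDiff db s := by
    simp [pvDiff, PySem.List.count_eq]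
  rw [hd, pvStrMul_toList, String.toList_append, pvStrMul_toList]
  have hn : (if 0 ≤ pvDiff db s then pvDiff db s + 1 else 0).toNat = (pvDiff db s + 1).toNat := by
    split_ifs <;> omega
  rw [hn]
  simp [pvCharBlk, h, PySem.Str.toList_lower]

theorem pvMain (db : List String) : find_children db = find_children_alt db := by
  unfold find_children find_children_alt
  dsimp only
  rw [PySem.Dict.foldl_insert_getD_add_one_eq_counter db]
  simp only [PySem.Dict.keys_counter, PySem.Dict.contains_counter, PySem.Dict.getD_counter]
  rw [PySem.List.foldl_pyRange_zero_pyGetD (PySem.List.sorted db fun x => x) ""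
      (fun (myarr : List String) (s : String) =>
        if ((PySem.List.sorted db fun x => x).contains (PySem.Str.lower s) ||
            (PySem.List.sorted db fun x => x).contains (PySem.Str.upper s)) = true then
          pvWhileA (PySem.Str.lower s)
            ((PySem.List.count (PySem.List.sorted db fun x => x) (PySem.Str.lower s) : Int) -
             (PySem.List.count (PySem.List.sorted db fun x => x) (PySem.Str.upper s) : Int)) 0
            (myarr ++ [s])
        else myarr) []]
  simp only [PySem.List.foldl_append_if]
  rw [pvAfold db]
  simp only [List.nil_append, PySem.List.len_eq, PySem.List.length_sorted]
  congr 1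
  apply String.toList_inj.mp
  simp only [PySem.Str.toList_join]
  have he : ("" : String).toList = [] := rfl
  rw [he, pvJoinNilFlatten, pvJoinNilFlatten]
  rw [pvFlattenMapFlatMap]
  simp only [pvABlkToList]
  simp only [List.map_map]
  rw [← List.flatMap_def]
  conv_rhs => rw [pvFlatMapCongr _ _
      (fun s => (List.replicate (db.count s) (pvCharBlk db s)).flatten)
      (by
        intro s hs
        have hc : pvCond db s = true := (List.mem_filter.mp hs).2
        simp only [Function.comp_apply]
        exact pvBstrToList db s hc)]
  rw [pvGrouping db, List.flatMap_assoc]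
  rw [pvFlatMapCongr _ _
      (fun s => (List.replicate (db.count s) (pvCharBlk db s)).flatten)
      (by
        intro s _
        simp [List.flatMap_def, List.map_replicate])]
  exact pvFlatMapFilter _
    (fun s => db.contains (PySem.Str.lower s) || db.contains (PySem.Str.upper s))
    (fun s => (List.replicate (db.count s) (pvCharBlk db s)).flatten)
    (by
      intro s _ hp
      have hc : pvCond db s = false := hp
      rw [List.flatten_eq_nil_iff]
      intro l hl
      obtain rfl := List.eq_of_mem_replicate hl
      simp [pvCharBlk, hc])

-- ===== VERDICT (by name: the statement is the Claim_ definition above) =====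
theorem find_children_spec : Claim_equal_find_children := by
  intro db _
  unfold Spec_find_children
  exact pvMain db
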